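-- pv_equiv track=rewrite | github.com/Adda0/optifa | src/optifa/basic.py | solve_for_one_handle_longer
-- ===== SOURCE A (Python) =====
-- import math
--
-- def solve_for_one_handle_longer(fa_a_id, fa_b_id):
--     fa_a_id[0] -= fa_b_id[0]
--     fa_b_id[0] = 0
--
--     if fa_a_id[1] == 0 and fa_b_id[1] == 0:  # No loops.
--         return False
--
--     elif fa_b_id[1] == 0:
--         return False
--
--     elif fa_a_id[1] == 0:
--         curr_num = 0
--         while curr_num <= fa_a_id[0]:
--             if curr_num == fa_a_id[0]:
--                 return True
--             else:
--                 curr_num += fa_b_id[1]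
--         return False
--
--     else:  # Two loops:
--         gcd = math.gcd(fa_a_id[1], fa_b_id[1])
--         if gcd == 1:
--             return True
--         else:
--             y = - fa_a_id[0]
--             while y < gcd:
--                 y += fa_a_id[1]
--             if y % gcd == 0:
--                 return True
--             else:
--                 return False
-- ===== SOURCE B (Python) =====
-- import math
--
-- def solve_for_one_handle_longer(fa_a_id, fa_b_id):
--     # same in-place mutation as the original
--     fa_a_id[0] -= fa_b_id[0]
--     fa_b_id[0] = 0
--     d, a1, b1 = fa_a_id[0], fa_a_id[1], fa_b_id[1]
--     if b1 == 0:
--         return False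
--     if a1 == 0:
--         return d >= 0 and d % b1 == 0
--     return d % math.gcd(a1, b1) == 0
-- ===== Notes on version B (the rewrite author's own statement) =====
-- stated objective: simpler
-- what changed: Replaced both counting while-loops by direct divisibility checks: the single-loop case becomes 'd >= 0 and d % b1 == 0' and the two-loop case 'd % gcd(a1,b1) == 0' (the gcd==1 special case folds into it); a timing run measured no speed difference on the generated inputs (the loop counts there are small), so no speed is claimed.
import Mathlib
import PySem

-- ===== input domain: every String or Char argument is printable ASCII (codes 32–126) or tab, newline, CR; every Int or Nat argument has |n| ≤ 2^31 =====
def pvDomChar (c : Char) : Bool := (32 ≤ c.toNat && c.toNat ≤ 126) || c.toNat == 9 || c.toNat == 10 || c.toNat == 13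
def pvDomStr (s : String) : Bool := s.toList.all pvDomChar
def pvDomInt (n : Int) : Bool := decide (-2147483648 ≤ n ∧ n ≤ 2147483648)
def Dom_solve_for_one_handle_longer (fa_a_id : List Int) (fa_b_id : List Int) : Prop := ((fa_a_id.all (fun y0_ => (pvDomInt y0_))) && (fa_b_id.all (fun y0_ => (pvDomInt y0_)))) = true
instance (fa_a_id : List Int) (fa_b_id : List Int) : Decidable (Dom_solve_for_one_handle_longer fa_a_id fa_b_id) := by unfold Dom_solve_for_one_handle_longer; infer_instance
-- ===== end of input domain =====

-- B replaces A's two counting while-loops by direct divisibility/gcd checks (simpler; no speed claimed).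
-- Both Pythons mutate their list arguments in place identically; the equivalence proved here is about the RETURN value.

-- ===== PORT A =====
-- while curr <= d: if curr == d: return True else curr += b1   (fuel makes it total; fuel 0 returns False, reached only outside Pre_)
def loopA1 (d b1 : Int) : Nat → Int → Bool
  | 0, _ => false
  | f + 1, curr =>
    if curr ≤ d then (if curr = d then true else loopA1 d b1 f (curr + b1)) else false

-- y = -d; while y < g: y += a1; return y % g == 0   (fuel makes it total; fuel 0 does the final check, reached only outside Pre_)
def loopA2 (g a1 : Int) : Nat → Int → Bool
  | 0, y => PySem.Int.mod y g == 0
  | f + 1, y => if y < g then loopA2 g a1 f (y + a1) else (PySem.Int.mod y g == 0)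

def solve_for_one_handle_longer (fa_a_id : List Int) (fa_b_id : List Int) : Bool :=
  let a0 := fa_a_id.getD 0 0 - fa_b_id.getD 0 0   -- fa_a_id[0] -= fa_b_id[0]
  let a1 := fa_a_id.getD 1 0
  let b1 := fa_b_id.getD 1 0
  if a1 = 0 ∧ b1 = 0 then false
  else if b1 = 0 then false
  else if a1 = 0 then loopA1 a0 b1 (a0.toNat + 1) 0
  else
    let g : Int := Int.gcd a1 b1
    if g = 1 then true
    else loopA2 g a1 ((g + a0).toNat + 1) (-a0)

-- ===== PORT B =====
def solve_for_one_handle_longer_alt (fa_a_id : List Int) (fa_b_id : List Int) : Bool :=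
  let d := fa_a_id.getD 0 0 - fa_b_id.getD 0 0
  let a1 := fa_a_id.getD 1 0
  let b1 := fa_b_id.getD 1 0
  if b1 = 0 then false
  else if a1 = 0 then decide (0 ≤ d) && (PySem.Int.mod d b1 == 0)
  else (PySem.Int.mod d (Int.gcd a1 b1) == 0)

-- ===== PRECONDITION & SPEC =====
-- Pre_ excludes: lists of length < 2 (A raises IndexError) and the two parameter combinations on
-- which A's while-loop counts downwards forever (negative step with a target it can never reach):
-- a1 = 0 with b1 < 0 < d, and a1 < 0 with gcd > 1 and -d < gcd — there A diverges, returning nothing.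
def Pre_solve_for_one_handle_longer (fa_a_id : List Int) (fa_b_id : List Int) : Prop :=
  2 ≤ fa_a_id.length ∧ 2 ≤ fa_b_id.length ∧
  ¬(fa_a_id.getD 1 0 = 0 ∧ fa_b_id.getD 1 0 < 0 ∧ 0 < fa_a_id.getD 0 0 - fa_b_id.getD 0 0) ∧
  ¬(fa_a_id.getD 1 0 ≠ 0 ∧ fa_b_id.getD 1 0 ≠ 0 ∧ fa_a_id.getD 1 0 < 0 ∧
    1 < Int.gcd (fa_a_id.getD 1 0) (fa_b_id.getD 1 0) ∧
    -(fa_a_id.getD 0 0 - fa_b_id.getD 0 0) < (Int.gcd (fa_a_id.getD 1 0) (fa_b_id.getD 1 0) : Int))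
instance (fa_a_id : List Int) (fa_b_id : List Int) : Decidable (Pre_solve_for_one_handle_longer fa_a_id fa_b_id) := by unfold Pre_solve_for_one_handle_longer; infer_instance

def pvWitness_solve_for_one_handle_longer : List Int × List Int := ([5, 6], [1, 4])

def Spec_solve_for_one_handle_longer (fa_a_id : List Int) (fa_b_id : List Int) (out : Bool) : Prop := out = solve_for_one_handle_longer_alt fa_a_id fa_b_id
instance (fa_a_id : List Int) (fa_b_id : List Int) (out : Bool) : Decidable (Spec_solve_for_one_handle_longer fa_a_id fa_b_id out) := by unfold Spec_solve_for_one_handle_longer; infer_instance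

-- ===== CLAIM (what is proved, stated in full; the proofs are below) =====
def Claim_equal_solve_for_one_handle_longer : Prop := ∀ (fa_a_id : List Int) (fa_b_id : List Int), Dom_solve_for_one_handle_longer fa_a_id fa_b_id → Pre_solve_for_one_handle_longer fa_a_id fa_b_id → Spec_solve_for_one_handle_longer fa_a_id fa_b_id (solve_for_one_handle_longer fa_a_id fa_b_id)

-- ===== LEMMAS AND PROOFS =====

-- Loop 1 with positive step: it finds d exactly when d is a nonnegative multiple of b1 away from curr.
theorem loopA1_char (d b1 : Int) (hb : 0 < b1) :
    ∀ (f : Nat) (curr : Int), (d - curr).toNat < f →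
      loopA1 d b1 f curr = decide (curr ≤ d ∧ b1 ∣ (d - curr)) := by
  intro f
  induction f with
  | zero => intro curr h; omega
  | succ f ih =>
    intro curr h
    by_cases hle : curr ≤ d
    · by_cases heq : curr = d
      · subst heq
        simp [loopA1]
      · have hlt : curr < d := lt_of_le_of_ne hle heq
        have hrec : loopA1 d b1 (f + 1) curr = loopA1 d b1 f (curr + b1) := by
          simp [loopA1, hle, heq]
        rw [hrec, ih (curr + b1) (by omega)]
        have hiff : b1 ∣ (d - curr) ↔ b1 ∣ (d - (curr + b1)) := by
          constructor
          · intro ⟨k, hk⟩; exact ⟨k - 1, by linarith [hk]⟩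
          · intro ⟨k, hk⟩; exact ⟨k + 1, by linarith [hk]⟩
        by_cases hdc : b1 ∣ (d - curr)
        · have hd' := hiff.mp hdc
          obtain ⟨k, hk⟩ := id hdc
          have hkpos : 0 < k := by nlinarith
          have hstep : curr + b1 ≤ d := by nlinarith
          simp [hdc, hd', hstep, hle]
        · have hd' : ¬ b1 ∣ (d - (curr + b1)) := fun hx => hdc (hiff.mpr hx)
          simp [hdc, hd']
    · simp [loopA1, hle]

-- Loop 2: when g divides the step a1, the residue check is decided by the initial y (any fuel).
theorem loopA2_char (g a1 : Int) (hdvd : g ∣ a1) :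
    ∀ (f : Nat) (y : Int), loopA2 g a1 f y = (PySem.Int.mod y g == 0) := by
  intro f
  induction f with
  | zero => intro y; rfl
  | succ f ih =>
    intro y
    by_cases hy : y < g
    · have step : (PySem.Int.mod (y + a1) g == 0) = (PySem.Int.mod y g == 0) := by
        rw [Bool.eq_iff_iff]
        simp only [beq_iff_eq, PySem.Int.mod_eq_zero_iff_dvd]
        obtain ⟨k, hk⟩ := hdvd
        constructor
        · intro ⟨m, hm⟩; exact ⟨m - k, by linarith⟩
        · intro ⟨m, hm⟩; exact ⟨m + k, by linarith⟩
      simp only [loopA2, if_pos hy, ih, step]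
    · simp only [loopA2, if_neg hy]

-- Core equivalence on plain integers d = a0 - b0, a1, b1.
theorem core_eq (d a1 b1 : Int)
    (hnd1 : ¬(a1 = 0 ∧ b1 < 0 ∧ 0 < d))
    (hnd2 : ¬(a1 ≠ 0 ∧ b1 ≠ 0 ∧ a1 < 0 ∧ 1 < Int.gcd a1 b1 ∧ -d < (Int.gcd a1 b1 : Int))) :
    (if a1 = 0 ∧ b1 = 0 then false
     else if b1 = 0 then false
     else if a1 = 0 then loopA1 d b1 (d.toNat + 1) 0
     else if (Int.gcd a1 b1 : Int) = 1 then true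
     else loopA2 (Int.gcd a1 b1) a1 (((Int.gcd a1 b1 : Int) + d).toNat + 1) (-d))
    =
    (if b1 = 0 then false
     else if a1 = 0 then decide (0 ≤ d) && (PySem.Int.mod d b1 == 0)
     else (PySem.Int.mod d (Int.gcd a1 b1) == 0)) := by
  by_cases hb0 : b1 = 0
  · simp [hb0]
  · by_cases ha0 : a1 = 0
    · rw [if_neg (by simp [hb0]), if_neg hb0, if_pos ha0, if_neg hb0, if_pos ha0]
      rcases lt_or_gt_of_ne hb0 with hneg | hpos
      · have hdle : d ≤ 0 := by
          by_contra h
          exact hnd1 ⟨ha0, hneg, by omega⟩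
        by_cases hdz : d = 0
        · subst hdz
          have h0 : PySem.Int.mod 0 b1 = 0 := (PySem.Int.mod_eq_zero_iff_dvd 0 b1).mpr (dvd_zero b1)
          simp [loopA1, h0]
        · have hdlt : d < 0 := lt_of_le_of_ne hdle hdz
          have ht : d.toNat = 0 := Int.toNat_of_nonpos (le_of_lt hdlt)
          rw [ht]
          simp [loopA1, not_le.mpr hdlt]
      · rw [loopA1_char d b1 hpos (d.toNat + 1) 0 (by omega)]
        by_cases hz : PySem.Int.mod d b1 = 0
        · have hdvd : b1 ∣ d := (PySem.Int.mod_eq_zero_iff_dvd d b1).mp hz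
          by_cases hdp : (0:Int) ≤ d <;> simp [hz, hdvd, hdp]
        · have hnd : ¬ b1 ∣ d := fun hx => hz ((PySem.Int.mod_eq_zero_iff_dvd d b1).mpr hx)
          simp [hz, hnd]
    · rw [if_neg (by simp [ha0]), if_neg hb0, if_neg ha0, if_neg hb0, if_neg ha0]
      have hgdvd : (Int.gcd a1 b1 : Int) ∣ a1 := Int.gcd_dvd_left a1 b1
      by_cases hg1 : (Int.gcd a1 b1 : Int) = 1
      · simp [hg1]
      · rw [if_neg hg1, loopA2_char _ _ hgdvd]
        have hiff : PySem.Int.mod (-d) (Int.gcd a1 b1) = 0 ↔ PySem.Int.mod d (Int.gcd a1 b1) = 0 := by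
          rw [PySem.Int.mod_eq_zero_iff_dvd, PySem.Int.mod_eq_zero_iff_dvd]
          exact dvd_neg
        by_cases hz : PySem.Int.mod d (Int.gcd a1 b1) = 0
        · simp [hz, hiff.mpr hz]
        · have : PySem.Int.mod (-d) (Int.gcd a1 b1) ≠ 0 := fun hx => hz (hiff.mp hx)
          simp [hz, this]

-- ===== VERDICT (by name: the statement is the Claim_ definition above) =====
theorem solve_for_one_handle_longer_spec : Claim_equal_solve_for_one_handle_longer := by
  intro fa_a_id fa_b_id _ hpre
  obtain ⟨hla, hlb, hnd1, hnd2⟩ := hpre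
  unfold Spec_solve_for_one_handle_longer
  exact core_eq (fa_a_id.getD 0 0 - fa_b_id.getD 0 0) (fa_a_id.getD 1 0) (fa_b_id.getD 1 0) hnd1 hnd2
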